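-- pv_equiv track=rewrite | github.com/florencygajera/Pdf | app/services/table_extractor.py | _split_grids_by_gap
-- ===== SOURCE A (Python) =====
-- from typing import Any, Dict, List, Optional, Tuple
--
-- def _split_grids_by_gap(row_ys: List[int], gap_threshold: int = 30) -> List[List[int]]:
--     """
--     I3 fix: split a flat list of row positions into separate table regions
--     wherever there is a gap larger than gap_threshold pixels.
--     """
--     if not row_ys:
--         return []
--     groups: List[List[int]] = [[row_ys[0]]]
--     for y in row_ys[1:]:
--         if y - groups[-1][-1] > gap_threshold:
--             groups.append([y])
--         else:
--             groups[-1].append(y)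
--     return groups
-- ===== SOURCE B (Python) =====
-- def _split_grids_by_gap(row_ys, gap_threshold=30):
--     # Segment-at-a-time: for each group start i, scan forward to the first gap
--     # larger than gap_threshold, then emit the whole group as one slice.
--     n = len(row_ys)
--     groups = []
--     i = 0
--     while i < n:
--         j = i + 1
--         while j < n and row_ys[j] - row_ys[j - 1] <= gap_threshold:
--             j += 1
--         groups.append(row_ys[i:j])
--         i = j
--     return groups
-- ===== Notes on version B (the rewrite author's own statement) =====
-- stated objective: alternative
-- what changed: Replaces A's element-at-a-time fold that appends each y to a growing groups-of-lists accumulator with a segment-at-a-time scan: an index loop finds the end of each group at the first oversized gap and emits the whole group as one slice row_ys[i:j].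
import Mathlib
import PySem

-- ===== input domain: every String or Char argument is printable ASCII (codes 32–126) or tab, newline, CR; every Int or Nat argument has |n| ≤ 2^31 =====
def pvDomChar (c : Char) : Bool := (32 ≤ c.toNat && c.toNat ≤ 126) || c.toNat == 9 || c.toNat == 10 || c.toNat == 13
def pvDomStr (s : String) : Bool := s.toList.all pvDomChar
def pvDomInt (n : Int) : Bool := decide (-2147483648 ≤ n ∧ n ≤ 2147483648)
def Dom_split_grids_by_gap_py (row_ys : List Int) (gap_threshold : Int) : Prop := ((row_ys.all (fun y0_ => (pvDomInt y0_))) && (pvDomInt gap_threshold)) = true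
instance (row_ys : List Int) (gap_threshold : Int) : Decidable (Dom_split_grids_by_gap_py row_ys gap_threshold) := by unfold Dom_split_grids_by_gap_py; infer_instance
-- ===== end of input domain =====

-- B replaces A's element-at-a-time fold (append y to the last group or start a new one)
-- with a segment-at-a-time index scan that finds each group's end and emits it as one slice;
-- objective: alternative (same O(n) cost, different decomposition).

-- ===== PORT A =====
-- the loop body of A's for-loop (groups[-1][-1], groups.append, groups[-1].append)
def pvAStep (t : Int) (groups : List (List Int)) (y : Int) : List (List Int) :=
  if y - groups.getLast!.getLast! > t then groups ++ [[y]]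
  else groups.dropLast ++ [groups.getLast! ++ [y]]

def split_grids_by_gap_py (row_ys : List Int) (gap_threshold : Int) : List (List Int) :=
  match row_ys with
  | [] => []                                   -- if not row_ys: return []
  | x :: rest => rest.foldl (pvAStep gap_threshold) [[x]]   -- groups = [[row_ys[0]]]; for y in row_ys[1:]

-- ===== PORT B =====
-- inner while: j advances while j < n and row_ys[j] - row_ys[j-1] <= gap_threshold
-- (indices are in range 0 ≤ j-1 < j < n when read, so getD is exact for Python's row_ys[j])
def pvBInner (xs : List Int) (t : Int) (n j : Nat) : Nat :=
  if h : j < n ∧ xs.getD j 0 - xs.getD (j - 1) 0 ≤ t then pvBInner xs t n (j + 1) else j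
termination_by n - j
decreasing_by omega

-- the inner while never moves j backwards (needed for the outer loop's termination)
theorem pvBInner_ge (xs : List Int) (t : Int) (n j : Nat) : j ≤ pvBInner xs t n j := by
  fun_induction pvBInner <;> omega

-- outer while: emit the slice row_ys[i:j] and continue at i = j
def pvBOuter (xs : List Int) (t : Int) (n i : Nat) : List (List Int) :=
  if h : i < n then
    -- j := pvBInner xs t n (i + 1); emit row_ys[i:j], continue at j
    PySem.List.slice xs (some (i : Int)) (some ((pvBInner xs t n (i + 1) : Nat) : Int))
      :: pvBOuter xs t n (pvBInner xs t n (i + 1))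
  else []
termination_by n - i
decreasing_by have := pvBInner_ge xs t n (i + 1); omega

def split_grids_by_gap_py_alt (row_ys : List Int) (gap_threshold : Int) : List (List Int) :=
  pvBOuter row_ys gap_threshold row_ys.length 0

-- ===== PRECONDITION & SPEC =====
def Spec_split_grids_by_gap_py (row_ys : List Int) (gap_threshold : Int) (out : List (List Int)) : Prop := out = split_grids_by_gap_py_alt row_ys gap_threshold
instance (row_ys : List Int) (gap_threshold : Int) (out : List (List Int)) : Decidable (Spec_split_grids_by_gap_py row_ys gap_threshold out) := by unfold Spec_split_grids_by_gap_py; infer_instance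

-- ===== CLAIM (what is proved, stated in full; the proofs are below) =====
def Claim_equal_split_grids_by_gap_py : Prop := ∀ (row_ys : List Int) (gap_threshold : Int), Dom_split_grids_by_gap_py row_ys gap_threshold → Spec_split_grids_by_gap_py row_ys gap_threshold (split_grids_by_gap_py row_ys gap_threshold)

-- ===== LEMMAS AND PROOFS =====

-- Python's list[-1] on a nonempty list built by appending: (l ++ [a])[-1] = a
theorem myGetLast!_concat {α} [Inhabited α] (l : List α) (a : α) : (l ++ [a]).getLast! = a := by
  induction l with
  | nil => rfl
  | cons b bs ih =>
    cases bs with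
    | nil => rfl
    | cons c cs => simpa [List.getLast!] using ih

-- reference segmentation: (takeG t prev xs) = (longest prefix of xs chained to prev by gaps ≤ t, rest)
def takeG (t : Int) (prev : Int) : List Int → List Int × List Int
  | [] => ([], [])
  | y :: ys => if y - prev ≤ t then ((takeG t y ys).1.cons y, (takeG t y ys).2) else ([], y :: ys)

theorem takeG_append (t prev : Int) (xs : List Int) :
    (takeG t prev xs).1 ++ (takeG t prev xs).2 = xs := by
  induction xs generalizing prev with
  | nil => simp [takeG]
  | cons y ys ih => by_cases h : y - prev ≤ t <;> simp [takeG, h, ih]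

theorem takeG_len (t prev : Int) (xs : List Int) : (takeG t prev xs).2.length ≤ xs.length := by
  have := congrArg List.length (takeG_append t prev xs)
  simp at this; omega

def seg (t : Int) : List Int → List (List Int)
  | [] => []
  | x :: xs => (x :: (takeG t x xs).1) :: seg t (takeG t x xs).2
termination_by l => l.length
decreasing_by have := takeG_len t x xs; simp; omega

theorem foldA (t : Int) (xs : List Int) (gs : List (List Int)) (c : List Int) (x : Int) :
    List.foldl (pvAStep t) (gs ++ [c ++ [x]]) xs
      = gs ++ ((c ++ [x] ++ (takeG t x xs).1) :: seg t (takeG t x xs).2) := by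
  induction xs generalizing gs c x with
  | nil => simp [takeG, seg]
  | cons y ys ih =>
    have hlast : (gs ++ [c ++ [x]]).getLast! = c ++ [x] := myGetLast!_concat gs (c ++ [x])
    have hlast2 : (c ++ [x]).getLast! = x := myGetLast!_concat c x
    by_cases h : y - x ≤ t
    · have hstep : pvAStep t (gs ++ [c ++ [x]]) y = gs ++ [(c ++ [x]) ++ [y]] := by
        simp only [pvAStep, hlast, hlast2]
        rw [if_neg (by omega), List.dropLast_concat]
      rw [List.foldl_cons, hstep, ih gs (c ++ [x]) y]
      simp [takeG, h]
    · have hstep : pvAStep t (gs ++ [c ++ [x]]) y = (gs ++ [c ++ [x]]) ++ [[y]] := by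
        simp only [pvAStep, hlast, hlast2]
        rw [if_pos (by omega)]
      have h2 := ih (gs ++ [c ++ [x]]) [] y
      simp only [List.nil_append] at h2
      rw [List.foldl_cons, hstep, h2]
      simp [takeG, h, seg]

theorem A_eq_seg (row_ys : List Int) (t : Int) :
    split_grids_by_gap_py row_ys t = seg t row_ys := by
  cases row_ys with
  | nil => simp [split_grids_by_gap_py, seg]
  | cons x rest =>
    have := foldA t rest ([] : List (List Int)) ([] : List Int) x
    simpa [split_grids_by_gap_py, seg] using this

theorem getD_of_drop (xs : List Int) (k : Nat) (a : Int) (l : List Int)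
    (h : xs.drop k = a :: l) : xs.getD k 0 = a := by
  induction k generalizing xs with
  | zero => simp at h; simp [h]
  | succ k ih =>
    cases xs with
    | nil => simp at h
    | cons b bs => exact ih bs (by simpa using h)

theorem innerB (t : Int) (rest : List Int) (xs : List Int) (k : Nat) (prev : Int)
    (h : xs.drop k = prev :: rest) :
    pvBInner xs t xs.length (k + 1) = (k + 1) + (takeG t prev rest).1.length := by
  induction rest generalizing k prev with
  | nil =>
    have hlen : xs.length = k + 1 := by
      have := congrArg List.length h; simp at this; omega
    rw [pvBInner]
    simp [hlen, takeG]
  | cons y ys ih =>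
    have hlen : k + 1 < xs.length := by
      have := congrArg List.length h; simp at this; omega
    have hdrop : xs.drop (k + 1) = y :: ys := by
      have : (xs.drop k).drop 1 = xs.drop (k + 1) := by rw [List.drop_drop]
      rw [← this, h]; simp
    have hk : xs.getD k 0 = prev := getD_of_drop xs k prev (y :: ys) h
    have hk1 : xs.getD (k + 1) 0 = y := getD_of_drop xs (k + 1) y ys hdrop
    rw [pvBInner]
    by_cases hgap : y - prev ≤ t
    · simp only [hk, hk1, Nat.add_sub_cancel]
      rw [dif_pos ⟨hlen, hgap⟩]
      rw [ih (k + 1) y hdrop]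
      simp [takeG, hgap]; omega
    · simp only [hk, hk1, Nat.add_sub_cancel]
      rw [dif_neg (by tauto)]
      simp [takeG, hgap]

theorem outerB (t : Int) (m : Nat) (rest xs : List Int) (i : Nat)
    (hm : rest.length ≤ m) (h : xs.drop i = rest) :
    pvBOuter xs t xs.length i = seg t rest := by
  induction m generalizing rest i with
  | zero =>
    have hnil : rest = [] := by
      cases rest with
      | nil => rfl
      | cons a l => simp at hm
    subst hnil
    have : xs.length ≤ i := by
      have := congrArg List.length h; simp at this; omega
    rw [pvBOuter]; simp [seg, Nat.not_lt.mpr this]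
  | succ m ih =>
    cases rest with
    | nil =>
      have : xs.length ≤ i := by
        have := congrArg List.length h; simp at this; omega
      rw [pvBOuter]; simp [seg, Nat.not_lt.mpr this]
    | cons x rs =>
      have hlt : i < xs.length := by
        have := congrArg List.length h; simp at this; omega
      have hinner := innerB t rs xs i x h
      have happ := takeG_append t x rs
      have hdrop1 : xs.drop (i + 1) = rs := by
        have : (xs.drop i).drop 1 = xs.drop (i + 1) := by rw [List.drop_drop]
        rw [← this, h]; simp
      rw [pvBOuter, dif_pos hlt, hinner, seg]
      rcases hp : takeG t x rs with ⟨g, r⟩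
      rw [hp] at hinner happ
      have hrlen : g.length + r.length = rs.length := by
        have := congrArg List.length happ; simp at this; omega
      have hslice : PySem.List.slice xs (some (i : Int)) (some ((i + 1 + g.length : Nat) : Int)) = x :: g := by
        rw [PySem.List.slice_natCast, h]
        have he : i + 1 + g.length - i = g.length + 1 := by omega
        rw [he, List.take_succ_cons]
        rw [← happ, List.take_left]
      have hdropj : xs.drop (i + 1 + g.length) = r := by
        have h2 : (xs.drop (i + 1)).drop g.length = xs.drop (i + 1 + g.length) := by
          rw [List.drop_drop]
        rw [← h2, hdrop1, ← happ, List.drop_left]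
      rw [hslice]
      congr 1
      exact ih r (i + 1 + g.length) (by simp at hm; omega) hdropj

theorem B_eq_seg (row_ys : List Int) (t : Int) :
    split_grids_by_gap_py_alt row_ys t = seg t row_ys := by
  exact outerB t row_ys.length row_ys row_ys 0 le_rfl (by simp)

-- ===== VERDICT (by name: the statement is the Claim_ definition above) =====
theorem split_grids_by_gap_py_spec : Claim_equal_split_grids_by_gap_py := by
  intro row_ys t _
  unfold Spec_split_grids_by_gap_py
  rw [A_eq_seg, B_eq_seg]
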